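-- pv_equiv track=rewrite | github.com/pypi-data/pypi-mirror-375 | packages/script-bisect/script_bisect-0.1.2.tar.gz/script_bisect-0.1.2/src/script_bisect/script_autocorrect.py | _find_import_insert_position
-- ===== SOURCE A (Python) =====
-- def _find_import_insert_position(lines: list[str]) -> int:
--     """Find the best position to insert new imports.
--
--     Args:
--         lines: Script lines
--
--     Returns:
--         Line index where imports should be inserted
--     """
--     # Skip shebang and encoding declarations
--     i = 0
--     while i < len(lines):
--         line = lines[i].strip()
--         if line.startswith("#!") or "coding:" in line or "encoding:" in line:
--             i += 1
--             continue
--         break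
--
--     # Skip docstring
--     if i < len(lines) and lines[i].strip().startswith(('"""', "'''")):
--         quote = '"""' if '"""' in lines[i] else "'''"
--         # Check if it's a single-line docstring (opening and closing quotes on same line)
--         if lines[i].count(quote) >= 2:
--             i += 1  # Single line docstring, just skip this line
--         else:
--             i += 1  # Skip opening quote line
--             while i < len(lines) and quote not in lines[i]:
--                 i += 1
--             if i < len(lines):
--                 i += 1  # Skip closing quote line
--
--     # Skip existing imports
--     while i < len(lines):
--         line = lines[i].strip()
--         if (
--             not line
--             or line.startswith("#")
--             or line.startswith(("import ", "from "))
--         ):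
--             i += 1
--         else:
--             break
--
--     return i
-- ===== SOURCE B (Python) =====
-- def _find_import_insert_position(lines: list[str]) -> int:
--     """Find the best position to insert new imports (suffix-consuming rewrite)."""
--
--     def _drop_while(pred, xs):
--         while xs and pred(xs[0]):
--             xs = xs[1:]
--         return xs
--
--     def _is_header(s):
--         t = s.strip()
--         return t.startswith("#!") or "coding:" in t or "encoding:" in t
--
--     def _is_skippable(s):
--         t = s.strip()
--         return not t or t.startswith("#") or t.startswith("import ") or t.startswith("from ")
--
--     rest = _drop_while(_is_header, lines)
--     if rest and rest[0].strip().startswith(('"""', "'''")):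
--         quote = '"""' if '"""' in rest[0] else "'''"
--         if rest[0].count(quote) >= 2:
--             rest = rest[1:]
--         else:
--             rest = _drop_while(lambda s: quote not in s, rest[1:])
--             if rest:
--                 rest = rest[1:]
--     rest = _drop_while(_is_skippable, rest)
--     return len(lines) - len(rest)
-- ===== Notes on version B (the rewrite author's own statement) =====
-- stated objective: alternative
-- what changed: Replaced A's three index-based while loops (i, len(lines), lines[i]) by a suffix-consuming decomposition: two named line predicates and a drop-while over list suffixes, with the insert position recovered as len(lines) - len(remaining suffix).
import Mathlib
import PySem

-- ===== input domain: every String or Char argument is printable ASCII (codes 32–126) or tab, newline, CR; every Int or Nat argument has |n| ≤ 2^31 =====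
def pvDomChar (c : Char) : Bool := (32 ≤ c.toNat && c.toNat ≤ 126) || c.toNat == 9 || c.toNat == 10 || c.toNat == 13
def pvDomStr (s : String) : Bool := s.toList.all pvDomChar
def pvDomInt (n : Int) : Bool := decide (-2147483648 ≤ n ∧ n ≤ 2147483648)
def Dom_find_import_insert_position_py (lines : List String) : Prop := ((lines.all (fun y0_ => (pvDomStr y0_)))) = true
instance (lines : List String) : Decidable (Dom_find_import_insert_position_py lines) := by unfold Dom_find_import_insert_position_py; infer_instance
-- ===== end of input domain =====

-- B is a suffix-consuming rewrite of A (drop-while over list suffixes with extracted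
-- predicates, position recovered as len(lines)-len(rest)) instead of A's three
-- index-based while loops; objective: alternative decomposition, same cost.

-- ===== PORT A =====
-- generic port of A's 'while i < len(lines): … if <test>: i += 1; continue; break' loops
def pvA_while (p : String → Bool) (lines : List String) (i : Nat) : Nat :=
  if h : i < lines.length then
    if p lines[i] then pvA_while p lines (i + 1) else i
  else i
termination_by lines.length - i

def find_import_insert_position_py (lines : List String) : Int :=
  -- Skip shebang and encoding declarations
  let i0 := pvA_while (fun s =>
      let line := PySem.Str.strip s
      PySem.Str.startswith line "#!" || PySem.Str.isIn "coding:" line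
        || PySem.Str.isIn "encoding:" line) lines 0
  -- Skip docstring
  let i1 :=
    if h : i0 < lines.length then
      let cur := lines[i0]
      if PySem.Str.startswith (PySem.Str.strip cur) "\"\"\""
          || PySem.Str.startswith (PySem.Str.strip cur) "'''" then
        let quote := if PySem.Str.isIn "\"\"\"" cur then "\"\"\"" else "'''"
        if 2 ≤ PySem.Str.count cur quote then i0 + 1  -- single-line docstring
        else
          let j := pvA_while (fun s => !(PySem.Str.isIn quote s)) lines (i0 + 1)
          if j < lines.length then j + 1 else j
      else i0
    else i0
  -- Skip existing imports
  let i2 := pvA_while (fun s =>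
      let line := PySem.Str.strip s
      line == "" || PySem.Str.startswith line "#"
        || PySem.Str.startswith line "import " || PySem.Str.startswith line "from ") lines i1
  (i2 : Int)

-- ===== PORT B =====
def pvB_dropWhile (p : String → Bool) : List String → List String
  | [] => []
  | x :: rest => if p x then pvB_dropWhile p rest else x :: rest

def pvB_isHeader (s : String) : Bool :=
  let t := PySem.Str.strip s
  PySem.Str.startswith t "#!" || PySem.Str.isIn "coding:" t || PySem.Str.isIn "encoding:" t

def pvB_isSkippable (s : String) : Bool :=
  let t := PySem.Str.strip s
  t == "" || PySem.Str.startswith t "#"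
    || PySem.Str.startswith t "import " || PySem.Str.startswith t "from "

def find_import_insert_position_py_alt (lines : List String) : Int :=
  let rest0 := pvB_dropWhile pvB_isHeader lines
  let rest1 :=
    match rest0 with
    | [] => rest0
    | x :: t =>
      let st := PySem.Str.strip x
      if PySem.Str.startswith st "\"\"\"" || PySem.Str.startswith st "'''" then
        let quote := if PySem.Str.isIn "\"\"\"" x then "\"\"\"" else "'''"
        if 2 ≤ PySem.Str.count x quote then t
        else
          match pvB_dropWhile (fun s => !(PySem.Str.isIn quote s)) t with
          | [] => []
          | _ :: t2 => t2
      else rest0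
  let rest2 := pvB_dropWhile pvB_isSkippable rest1
  ((lines.length - rest2.length : Nat) : Int)

-- ===== PRECONDITION & SPEC =====
def Spec_find_import_insert_position_py (lines : List String) (out : Int) : Prop := out = find_import_insert_position_py_alt lines
instance (lines : List String) (out : Int) : Decidable (Spec_find_import_insert_position_py lines out) := by unfold Spec_find_import_insert_position_py; infer_instance

-- ===== CLAIM (what is proved, stated in full; the proofs are below) =====
def Claim_equal_find_import_insert_position_py : Prop := ∀ (lines : List String), Dom_find_import_insert_position_py lines → Spec_find_import_insert_position_py lines (find_import_insert_position_py lines)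

-- ===== LEMMAS AND PROOFS =====

-- A's index loop lands exactly where B's suffix drop-while lands.
lemma pvA_while_drop (p : String → Bool) (lines : List String) :
    ∀ i, i ≤ lines.length →
      pvA_while p lines i ≤ lines.length ∧
      lines.drop (pvA_while p lines i) = pvB_dropWhile p (lines.drop i) := by
  intro i hi
  induction hk : lines.length - i generalizing i with
  | zero =>
    have hi' : i = lines.length := by omega
    subst hi'
    rw [pvA_while]
    simp [pvB_dropWhile]
  | succ k ih =>
    have hlt : i < lines.length := by omega
    have hdrop : lines.drop i = lines[i] :: lines.drop (i + 1) :=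
      List.drop_eq_getElem_cons hlt
    rw [pvA_while, dif_pos hlt, hdrop, pvB_dropWhile]
    by_cases hp : p lines[i]
    · simp only [hp]
      exact ih (i + 1) (by omega) (by omega)
    · simp only [hp, if_neg, Bool.false_eq_true, not_false_eq_true]
      exact ⟨le_of_lt hlt, (List.drop_eq_getElem_cons hlt)⟩

-- proof-only restatement of A's docstring block (identical text to the middle let of A's port)
def pvMidA (lines : List String) (i0 : Nat) : Nat :=
  if h : i0 < lines.length then
    let cur := lines[i0]
    if PySem.Str.startswith (PySem.Str.strip cur) "\"\"\""
        || PySem.Str.startswith (PySem.Str.strip cur) "'''" then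
      let quote := if PySem.Str.isIn "\"\"\"" cur then "\"\"\"" else "'''"
      if 2 ≤ PySem.Str.count cur quote then i0 + 1
      else
        let j := pvA_while (fun s => !(PySem.Str.isIn quote s)) lines (i0 + 1)
        if j < lines.length then j + 1 else j
    else i0
  else i0

-- proof-only restatement of B's docstring block (identical text to the middle let of B's port)
def pvMidB (rest0 : List String) : List String :=
  match rest0 with
  | [] => rest0
  | x :: t =>
    let st := PySem.Str.strip x
    if PySem.Str.startswith st "\"\"\"" || PySem.Str.startswith st "'''" then
      let quote := if PySem.Str.isIn "\"\"\"" x then "\"\"\"" else "'''"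
      if 2 ≤ PySem.Str.count x quote then t
      else
        match pvB_dropWhile (fun s => !(PySem.Str.isIn quote s)) t with
        | [] => []
        | _ :: t2 => t2
    else rest0

lemma pvMid_eq (lines : List String) (i0 : Nat) (h0 : i0 ≤ lines.length) :
    pvMidA lines i0 ≤ lines.length ∧
    lines.drop (pvMidA lines i0) = pvMidB (lines.drop i0) := by
  rw [pvMidA]
  by_cases h : i0 < lines.length
  · have hd : lines.drop i0 = lines[i0] :: lines.drop (i0 + 1) := List.drop_eq_getElem_cons h
    rw [dif_pos h, hd, pvMidB]
    simp only
    by_cases hq : (PySem.Str.startswith (PySem.Str.strip lines[i0]) "\"\"\""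
        || PySem.Str.startswith (PySem.Str.strip lines[i0]) "'''") = true
    · rw [if_pos hq, if_pos hq]
      by_cases hc : 2 ≤ PySem.Str.count lines[i0]
          (if PySem.Str.isIn "\"\"\"" lines[i0] then "\"\"\"" else "'''")
      · rw [if_pos hc, if_pos hc]
        exact ⟨by omega, rfl⟩
      · rw [if_neg hc, if_neg hc]
        obtain ⟨hjle, hjdrop⟩ := pvA_while_drop
          (fun s => !(PySem.Str.isIn (if PySem.Str.isIn "\"\"\"" lines[i0] then "\"\"\"" else "'''") s))
          lines (i0 + 1) (by omega)
        by_cases hj : pvA_while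
            (fun s => !(PySem.Str.isIn (if PySem.Str.isIn "\"\"\"" lines[i0] then "\"\"\"" else "'''") s))
            lines (i0 + 1) < lines.length
        · rw [if_pos hj]
          rw [← hjdrop]
          refine ⟨hj, ?_⟩
          · rw [← List.tail_drop]
            cases hcase : lines.drop (pvA_while
                (fun s => !(PySem.Str.isIn (if PySem.Str.isIn "\"\"\"" lines[i0] then "\"\"\"" else "'''") s))
                lines (i0 + 1)) with
            | nil =>
              exfalso
              have := List.length_drop (l := lines) (i := pvA_while
                (fun s => !(PySem.Str.isIn (if PySem.Str.isIn "\"\"\"" lines[i0] then "\"\"\"" else "'''") s))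
                lines (i0 + 1))
              rw [hcase] at this
              simp only [List.length_nil] at this
              omega
            | cons y t2 => simp only [List.tail_cons]
        · rw [if_neg hj]
          have hje : pvA_while
              (fun s => !(PySem.Str.isIn (if PySem.Str.isIn "\"\"\"" lines[i0] then "\"\"\"" else "'''") s))
              lines (i0 + 1) = lines.length := by omega
          rw [← hjdrop, hje]
          simp
    · rw [if_neg hq, if_neg hq]
      exact ⟨by omega, hd⟩
  · have he : lines.length ≤ i0 := by omega
    rw [dif_neg h, List.drop_eq_nil_of_le he, pvMidB]
    exact ⟨h0, rfl⟩

-- ===== VERDICT (by name: the statement is the Claim_ definition above) =====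
theorem find_import_insert_position_py_spec : Claim_equal_find_import_insert_position_py := by
  intro lines _
  show find_import_insert_position_py lines = find_import_insert_position_py_alt lines
  have hA : find_import_insert_position_py lines =
      ((pvA_while pvB_isSkippable lines
        (pvMidA lines (pvA_while pvB_isHeader lines 0)) : Nat) : Int) := rfl
  have hB : find_import_insert_position_py_alt lines =
      ((lines.length -
        (pvB_dropWhile pvB_isSkippable (pvMidB (pvB_dropWhile pvB_isHeader lines))).length : Nat) : Int) := rfl
  rw [hA, hB]
  obtain ⟨h0le, h0drop⟩ := pvA_while_drop pvB_isHeader lines 0 (Nat.zero_le _)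
  rw [List.drop_zero] at h0drop
  obtain ⟨h1le, h1drop⟩ := pvMid_eq lines (pvA_while pvB_isHeader lines 0) h0le
  rw [h0drop] at h1drop
  obtain ⟨h2le, h2drop⟩ := pvA_while_drop pvB_isSkippable lines
    (pvMidA lines (pvA_while pvB_isHeader lines 0)) h1le
  rw [h1drop] at h2drop
  rw [← h2drop, List.length_drop]
  congr 1
  omega
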